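-- pv_equiv track=rewrite | github.com/USAR-Rankings/rankings_model | src/tasks/run_simulations/helpers.py | create_pools
-- ===== SOURCE A (Python) =====
-- import math
--
-- def create_pools(dict,num_pools):
--     teams = list(dict.keys())
--     final=[[] for _ in range(num_pools)]
--     max_number_teams=math.ceil(len(teams)/num_pools)
--     order=([x for x in range(num_pools)]+([x for x in range(num_pools)][::-1]))*math.ceil(max_number_teams/2)
--     while len(teams)>0:
--         final[order.pop(0)].append(teams.pop(0))
--     return(final)
-- ===== SOURCE B (Python) =====
-- import math
--
-- def create_pools(dict, num_pools):
--     teams = list(dict.keys())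
--     final = [[] for _ in range(num_pools)]
--     max_number_teams = math.ceil(len(teams) / num_pools)
--     it = iter(teams)
--     for r in range(max_number_teams):
--         pool_order = range(num_pools) if r % 2 == 0 else reversed(range(num_pools))
--         for p in pool_order:
--             team = next(it, None)
--             if team is None:
--                 return final
--             final[p].append(team)
--     return final
-- ===== Notes on version B (the rewrite author's own statement) =====
-- stated objective: faster
-- what changed: Replaces A's materialized repeated snake order list and the pop(0)-from-both-lists loop (each pop(0) is O(n)) with a nested rounds-by-pools traversal over an iterator, appending directly in forward/reversed pool order per round.
import Mathlib
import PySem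

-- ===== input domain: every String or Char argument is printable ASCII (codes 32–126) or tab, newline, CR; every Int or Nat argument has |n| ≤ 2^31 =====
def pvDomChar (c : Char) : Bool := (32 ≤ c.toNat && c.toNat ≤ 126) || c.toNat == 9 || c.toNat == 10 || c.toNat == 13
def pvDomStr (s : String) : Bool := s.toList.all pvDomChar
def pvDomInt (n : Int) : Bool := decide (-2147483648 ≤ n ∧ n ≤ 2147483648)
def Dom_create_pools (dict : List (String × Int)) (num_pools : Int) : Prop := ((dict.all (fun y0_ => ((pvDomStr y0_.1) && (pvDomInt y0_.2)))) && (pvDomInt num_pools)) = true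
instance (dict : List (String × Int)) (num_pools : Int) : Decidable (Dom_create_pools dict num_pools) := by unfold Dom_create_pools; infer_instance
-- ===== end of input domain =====

-- B replaces A's materialized snake-order list and pop(0)-driven flat loop by a nested
-- rounds × pools traversal consuming the teams in order (faster: no O(n) pop(0) per team).

-- final[i].append(t) for a list index 0 ≤ i < len(final); every index used below comes
-- from range(num_pools), so this is exact on all reachable calls
def pvAppendAt (final : List (List String)) (i : Int) (t : String) : List (List String) :=
  final.modify i.toNat (fun pool => pool ++ [t])

-- ===== PORT A =====
-- the while loop: final[order.pop(0)].append(teams.pop(0)); if order empties while teams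
-- remain the Python raises IndexError (excluded by Pre_), here we stop
def pvLoopA : List String → List Int → List (List String) → List (List String)
  | [], _, final => final
  | _ :: _, [], final => final
  | t :: ts, o :: os, final => pvLoopA ts os (pvAppendAt final o t)

def create_pools (dict : List (String × Int)) (num_pools : Int) : List (List String) :=
  let teams := PySem.List.dedup (dict.map Prod.fst)   -- list(dict.keys())
  let final := (PySem.List.pyRange 0 num_pools 1).map (fun _ => ([] : List String))
  -- math.ceil(len(teams)/num_pools): exact integer ceiling division -((-a)//b)
  let max_number_teams := -(PySem.Int.floordiv (-(teams.length : Int)) num_pools)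
  let fwd := PySem.List.pyRange 0 num_pools 1
  let order := PySem.List.pyRepeat (fwd ++ ((PySem.List.slice? fwd none none (-1)).getD []))
                 (-(PySem.Int.floordiv (-max_number_teams) 2))
  pvLoopA teams order final

-- ===== PORT B =====
-- pool order of round r: range(num_pools) if r % 2 == 0 else reversed(range(num_pools))
def pvRoundIdx (num_pools : Int) (r : Nat) : List Int :=
  if r % 2 == 0 then PySem.List.pyRange 0 num_pools 1
  else (PySem.List.pyRange 0 num_pools 1).reverse

-- the inner 'for p in pool_order' loop: returns (final, remaining teams, ran-out flag);
-- the flag is Source B's early 'return final' when next(it, None) is None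
def pvFillRound : List String → List Int → List (List String) → List (List String) × List String × Bool
  | ts, [], final => (final, ts, false)
  | [], _ :: _, final => (final, [], true)
  | t :: ts, p :: ps, final => pvFillRound ts ps (pvAppendAt final p t)

-- the outer 'for r in range(max_number_teams)' loop (k rounds left, r = current round)
def pvRoundsB (num_pools : Int) : Nat → Nat → List String → List (List String) → List (List String)
  | 0, _, _, final => final
  | k + 1, r, ts, final =>
      match pvFillRound ts (pvRoundIdx num_pools r) final with
      | (final', _, true) => final'
      | (final', ts', false) => pvRoundsB num_pools k (r + 1) ts' final'

def create_pools_alt (dict : List (String × Int)) (num_pools : Int) : List (List String) :=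
  let teams := PySem.List.dedup (dict.map Prod.fst)
  let final := (PySem.List.pyRange 0 num_pools 1).map (fun _ => ([] : List String))
  let max_number_teams := -(PySem.Int.floordiv (-(teams.length : Int)) num_pools)
  pvRoundsB num_pools max_number_teams.toNat 0 teams final

-- ===== PRECONDITION & SPEC =====
-- A raises ZeroDivisionError when num_pools = 0, and IndexError (pop from the empty
-- order list) when num_pools < 0 and the dict is nonempty; exactly those are excluded.
def Pre_create_pools (dict : List (String × Int)) (num_pools : Int) : Prop :=
  0 < num_pools ∨ (num_pools ≠ 0 ∧ dict = [])
instance (dict : List (String × Int)) (num_pools : Int) : Decidable (Pre_create_pools dict num_pools) := by unfold Pre_create_pools; infer_instance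

def pvWitness_create_pools : (List (String × Int)) × Int := ([("a", 1), ("b", 2), ("c", 3)], 2)

def Spec_create_pools (dict : List (String × Int)) (num_pools : Int) (out : List (List String)) : Prop := out = create_pools_alt dict num_pools
instance (dict : List (String × Int)) (num_pools : Int) (out : List (List String)) : Decidable (Spec_create_pools dict num_pools out) := by unfold Spec_create_pools; infer_instance

-- ===== CLAIM (what is proved, stated in full; the proofs are below) =====
def Claim_equal_create_pools : Prop := ∀ (dict : List (String × Int)) (num_pools : Int), Dom_create_pools dict num_pools → Pre_create_pools dict num_pools → Spec_create_pools dict num_pools (create_pools dict num_pools)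

-- ===== LEMMAS AND PROOFS =====

theorem pvLoopA_nil_teams (os : List Int) (f : List (List String)) : pvLoopA [] os f = f := by
  cases os <;> rfl

theorem pvLoopA_nil_order (ts : List String) (f : List (List String)) : pvLoopA ts [] f = f := by
  cases ts <;> rfl

theorem pvFillRound_eq (idxs : List Int) (ts : List String) (f : List (List String)) :
    pvFillRound ts idxs f = (pvLoopA ts idxs f, ts.drop idxs.length, decide (ts.length < idxs.length)) := by
  induction idxs generalizing ts f with
  | nil => cases ts <;> simp [pvFillRound, pvLoopA_nil_order]
  | cons p ps ih =>
      cases ts with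
      | nil => simp [pvFillRound, pvLoopA]
      | cons t ts' => simp [pvFillRound, pvLoopA, ih]

theorem pvLoopA_append (o1 o2 : List Int) (ts : List String) (f : List (List String)) :
    pvLoopA ts (o1 ++ o2) f = pvLoopA (ts.drop o1.length) o2 (pvLoopA ts o1 f) := by
  induction o1 generalizing ts f with
  | nil => simp [pvLoopA_nil_order]
  | cons o os ih =>
      cases ts with
      | nil => simp [pvLoopA_nil_teams, pvLoopA]
      | cons t ts' => simp [pvLoopA, ih]

theorem pvRoundsB_eq (n : Int) (k : Nat) :
    ∀ (r : Nat) (ts : List String) (f : List (List String)),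
    pvRoundsB n k r ts f = pvLoopA ts ((List.range' r k).map (pvRoundIdx n)).flatten f := by
  induction k with
  | zero => intro r ts f; simp [pvRoundsB, pvLoopA_nil_order]
  | succ k ih =>
      intro r ts f
      have hr : List.range' r (k + 1) = r :: List.range' (r + 1) k := by simp [List.range'_succ]
      rw [hr]
      simp only [List.map_cons, List.flatten_cons]
      rw [pvLoopA_append]
      show (match pvFillRound ts (pvRoundIdx n r) f with
            | (final', _, true) => final'
            | (final', ts', false) => pvRoundsB n k (r + 1) ts' final') = _
      rw [pvFillRound_eq]
      by_cases h : ts.length < (pvRoundIdx n r).length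
      · simp only [h, decide_true]
        have hd : ts.drop (pvRoundIdx n r).length = [] := by
          apply List.drop_eq_nil_of_le; omega
        rw [hd, pvLoopA_nil_teams]
      · simp only [h, decide_false]
        exact ih (r + 1) (ts.drop (pvRoundIdx n r).length) (pvLoopA ts (pvRoundIdx n r) f)

theorem pvRoundsB_nil_teams (n : Int) (k : Nat) :
    ∀ (r : Nat) (f : List (List String)), pvRoundsB n k r [] f = f := by
  induction k with
  | zero => intro r f; rfl
  | succ k ih =>
      intro r f
      show (match pvFillRound [] (pvRoundIdx n r) f with
            | (final', _, true) => final'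
            | (final', ts', false) => pvRoundsB n k (r + 1) ts' final') = f
      cases h : pvRoundIdx n r with
      | nil => simp [pvFillRound, ih]
      | cons p ps => simp [pvFillRound]

theorem pvRoundIdx_even (n : Int) (r : Nat) (h : r % 2 = 0) :
    pvRoundIdx n r = PySem.List.pyRange 0 n 1 := by
  simp [pvRoundIdx, h]

theorem pvRoundIdx_odd (n : Int) (r : Nat) (h : r % 2 = 1) :
    pvRoundIdx n r = (PySem.List.pyRange 0 n 1).reverse := by
  simp [pvRoundIdx, h]

theorem pvRoundIdx_length (n : Int) (r : Nat) : (pvRoundIdx n r).length = n.toNat := by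
  unfold pvRoundIdx
  split <;> simp [PySem.List.length_pyRange_one]

-- the snake block list, seen round by round
theorem pvOrder_blocks (n : Int) (m : Nat) :
    ∀ (s : Nat), s % 2 = 0 →
    (List.replicate m (PySem.List.pyRange 0 n 1 ++ (PySem.List.pyRange 0 n 1).reverse)).flatten
      = ((List.range' s (2 * m)).map (pvRoundIdx n)).flatten := by
  induction m with
  | zero => intro s _; simp
  | succ m ih =>
      intro s hs
      have h2 : 2 * (m + 1) = (2 * m) + 1 + 1 := by omega
      have hr : List.range' s (2 * m + 1 + 1) = s :: (s + 1) :: List.range' (s + 2) (2 * m) := by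
        rw [List.range'_succ, List.range'_succ]
      rw [h2, hr]
      simp only [List.map_cons, List.flatten_cons, List.replicate_succ, ← List.append_assoc]
      rw [pvRoundIdx_even n s hs, pvRoundIdx_odd n (s + 1) (by omega),
          ih (s + 2) (by omega)]

theorem pvFlatten_roundIdx_length (n : Int) (l : List Nat) :
    ((l.map (pvRoundIdx n)).flatten).length = l.length * n.toNat := by
  induction l with
  | nil => simp
  | cons r rs ih => simp [pvRoundIdx_length, ih, Nat.succ_mul]; omega

theorem pvLoopA_truncate (o1 o2 : List Int) (ts : List String) (f : List (List String))
    (h : ts.length ≤ o1.length) : pvLoopA ts (o1 ++ o2) f = pvLoopA ts o1 f := by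
  rw [pvLoopA_append, List.drop_eq_nil_of_le h, pvLoopA_nil_teams]

-- ceiling division facts: c = -((-a)//b) with 0 < b is ⌈a/b⌉
theorem pvCeil_bounds (a b : Int) (hb : 0 < b) :
    (-(PySem.Int.floordiv (-a) b) - 1) * b < a ∧ a ≤ -(PySem.Int.floordiv (-a) b) * b := by
  exact (PySem.Int.neg_floordiv_neg_eq_iff_of_pos hb).mp rfl

-- ===== VERDICT (by name: the statement is the Claim_ definition above) =====
theorem create_pools_spec : Claim_equal_create_pools := by
  intro dict num_pools _hdom hpre
  unfold Spec_create_pools create_pools create_pools_alt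
  rcases hpre with hpos | ⟨hne, hnil⟩
  · -- num_pools > 0
    simp only []
    set teams := PySem.List.dedup (dict.map Prod.fst) with hteams
    set n := num_pools
    set L : Int := (teams.length : Int) with hL
    set mnt : Int := -(PySem.Int.floordiv (-L) n) with hmnt
    set mI : Int := -(PySem.Int.floordiv (-mnt) 2) with hmI
    have hL0 : 0 ≤ L := Int.natCast_nonneg teams.length
    obtain ⟨hmnt1, hmnt2⟩ := pvCeil_bounds L n hpos
    rw [← hmnt] at hmnt1 hmnt2
    have hmnt0 : 0 ≤ mnt := by
      by_contra hneg
      push Not at hneg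
      nlinarith
    obtain ⟨hmI1, hmI2⟩ := pvCeil_bounds mnt 2 (by omega)
    rw [← hmI] at hmI1 hmI2
    have hmI0 : 0 ≤ mI := by omega
    have hcov : teams.length ≤ mnt.toNat * n.toNat := by
      have : (teams.length : Int) ≤ (mnt.toNat : Int) * (n.toNat : Int) := by
        rw [Int.toNat_of_nonneg hmnt0, Int.toNat_of_nonneg (le_of_lt hpos)]
        exact hmnt2
      exact_mod_cast this
    have hle : mnt.toNat ≤ 2 * mI.toNat := by omega
    rw [pvRoundsB_eq]
    rw [PySem.List.slice?_none_none_neg_one]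
    show pvLoopA teams
        (PySem.List.pyRepeat (PySem.List.pyRange 0 n 1 ++ (PySem.List.pyRange 0 n 1).reverse) mI) _ = _
    have hrep : PySem.List.pyRepeat (PySem.List.pyRange 0 n 1 ++ (PySem.List.pyRange 0 n 1).reverse) mI
        = (List.replicate mI.toNat (PySem.List.pyRange 0 n 1 ++ (PySem.List.pyRange 0 n 1).reverse)).flatten := by
      simp [PySem.List.pyRepeat]
    rw [hrep, pvOrder_blocks n mI.toNat 0 rfl]
    have hsplit : List.range' 0 (2 * mI.toNat)
        = List.range' 0 mnt.toNat ++ List.range' mnt.toNat (2 * mI.toNat - mnt.toNat) := by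
      rw [show 2 * mI.toNat = mnt.toNat + (2 * mI.toNat - mnt.toNat) from by omega,
          ← List.range'_append_1]
      simp
    rw [hsplit, List.map_append, List.flatten_append]
    rw [pvLoopA_truncate]
    rw [pvFlatten_roundIdx_length, List.length_range']
    exact hcov
  · -- num_pools ≠ 0 and dict = []
    subst hnil
    simp only [List.map_nil]
    rw [show PySem.List.dedup ([] : List String) = [] from rfl]
    rw [pvRoundsB_nil_teams, pvLoopA_nil_teams]
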